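-- pv_equiv track=rewrite | github.com/mole828/leetcode | problems/3583.count-special-triplets.py | specialTriplets
-- ===== SOURCE A (Python) =====
-- from bisect import bisect_left
-- from collections import defaultdict
-- from typing import List
--
-- def specialTriplets(nums: List[int]) -> int:
--     counter = defaultdict(list)
--     n = len(nums)
--     for i, num in enumerate(nums):
--         counter[num].append(i)
--     result = 0
--     if 0 in counter:
--         zero_count = len(counter[0])
--         result += zero_count * (zero_count - 1) * (zero_count - 2) // 6
--     for j in range(n):
--         num_j = nums[j]
--         if num_j == 0:
--             continue
--         double_num_j = num_j * 2
--         if double_num_j in counter: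
--             p = bisect_left(counter[double_num_j], j)
--             result += (len(counter[double_num_j]) - p) * p
--     return result % (10**9 + 7)
-- ===== SOURCE B (Python) =====
-- from typing import List
--
--
-- def specialTriplets(nums: List[int]) -> int:
--     MOD = 10 ** 9 + 7
--     left = {}
--     right = {}
--     for v in nums:
--         right[v] = right.get(v, 0) + 1
--     res = 0
--     for v in nums:
--         right[v] = right.get(v, 0) - 1
--         t = 2 * v
--         res += left.get(t, 0) * right.get(t, 0)
--         left[v] = left.get(v, 0) + 1
--     return res % MOD
-- ===== Notes on version B (the rewrite author's own statement) =====
-- stated objective: alternative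
-- what changed: Replaced the index-list dictionary with per-middle-element binary search (plus a separate closed-form term for zeros) by a single pass that maintains running prefix and suffix count dictionaries and adds left[2v]*right[2v] at each element, covering the zero case uniformly.
import Mathlib
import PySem

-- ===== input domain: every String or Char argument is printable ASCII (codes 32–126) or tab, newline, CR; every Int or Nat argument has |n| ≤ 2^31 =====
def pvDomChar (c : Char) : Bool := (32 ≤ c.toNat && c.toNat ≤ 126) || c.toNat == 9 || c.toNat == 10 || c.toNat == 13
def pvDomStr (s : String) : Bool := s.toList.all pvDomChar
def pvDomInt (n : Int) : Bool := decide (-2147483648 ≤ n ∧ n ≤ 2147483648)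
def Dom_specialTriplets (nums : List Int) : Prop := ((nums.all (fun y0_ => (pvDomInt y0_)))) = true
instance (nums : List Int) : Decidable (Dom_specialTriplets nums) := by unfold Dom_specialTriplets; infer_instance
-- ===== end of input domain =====

-- B replaces the per-middle-element binary search over index lists (plus a separate
-- closed-form term for zeros) by one pass with running prefix/suffix count dictionaries
-- (a different algorithm of similar measured cost).

-- ===== PORT A =====
-- bisect.bisect_left(a, x) ported step for step (lo, hi kept as Nat; Python's
-- (lo+hi)//2 on nonnegative ints is Nat division; a[mid] is always in range here).
def bisectLeft (a : List Int) (x : Int) (lo hi : Nat) : Nat :=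
  if _h : lo < hi then
    let mid := (lo + hi) / 2
    if PySem.List.pyGetD a (mid : Int) 0 < x then bisectLeft a x (mid + 1) hi
    else bisectLeft a x lo mid
  else lo
termination_by hi - lo
decreasing_by all_goals omega

def specialTriplets (nums : List Int) : Int :=
  let counter : PySem.Dict Int (List Int) :=
    (PySem.List.enumerate nums).foldl
      (fun d p => d.modify p.2 [] (fun l => l ++ [p.1])) PySem.Dict.empty
  let n : Int := PySem.List.len nums
  let result : Int :=
    if counter.contains 0 then
      let zeroCount : Int := PySem.List.len (counter.getD 0 [])
      0 + PySem.Int.floordiv (zeroCount * (zeroCount - 1) * (zeroCount - 2)) 6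
    else 0
  let result :=
    (PySem.List.pyRange 0 n).foldl (fun result j =>
      let numJ := PySem.List.pyGetD nums j 0
      if numJ = 0 then result
      else
        let doubleNumJ := numJ * 2
        if counter.contains doubleNumJ then
          let lst := counter.getD doubleNumJ []
          let p : Int := (bisectLeft lst j 0 lst.length : Int)
          result + (PySem.List.len lst - p) * p
        else result) result
  PySem.Int.mod result (10 ^ 9 + 7)

-- ===== PORT B =====
def specialTriplets_alt (nums : List Int) : Int :=
  let MOD : Int := 10 ^ 9 + 7
  let right : PySem.Dict Int Int :=
    nums.foldl (fun d v => d.insert v (d.getD v 0 + 1)) PySem.Dict.empty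
  let st :=
    nums.foldl (fun (s : Int × PySem.Dict Int Int × PySem.Dict Int Int) v =>
      let right := s.2.2.insert v (s.2.2.getD v 0 - 1)
      let t := 2 * v
      let res := s.1 + s.2.1.getD t 0 * right.getD t 0
      let left := s.2.1.insert v (s.2.1.getD v 0 + 1)
      (res, left, right)) (0, PySem.Dict.empty, right)
  PySem.Int.mod st.1 MOD

-- ===== PRECONDITION & SPEC =====
def Spec_specialTriplets (nums : List Int) (out : Int) : Prop := out = specialTriplets_alt nums
instance (nums : List Int) (out : Int) : Decidable (Spec_specialTriplets nums out) := by unfold Spec_specialTriplets; infer_instance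

-- ===== CLAIM (what is proved, stated in full; the proofs are below) =====
def Claim_equal_specialTriplets : Prop := ∀ (nums : List Int), Dom_specialTriplets nums → Spec_specialTriplets nums (specialTriplets nums)

-- ===== LEMMAS AND PROOFS =====

def SF (F : List Int → Int → List Int → Int) : List Int → List Int → Int
  | _, [] => 0
  | pre, v :: l => F pre v l + SF F (pre ++ [v]) l

def FB (pre : List Int) (v : Int) (suf : List Int) : Int :=
  (pre.count (2 * v) : Int) * ((suf.count (2 * v) : Int))

def FA (pre : List Int) (v : Int) (suf : List Int) : Int :=
  if v = 0 then 0 else FB pre v suf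

def F0 (pre : List Int) (v : Int) (suf : List Int) : Int :=
  if v = 0 then FB pre v suf else 0

-- the index list A's counter stores for value c
def Lc (nums : List Int) (s : Int) (c : Int) : List Int :=
  ((PySem.List.enumerate nums s).filter (fun p => p.2 == c)).map (fun p => p.1)

-- the body of A's second loop as a function of j
def gA (nums : List Int) (counter : PySem.Dict Int (List Int)) (j : Int) : Int :=
  let numJ := PySem.List.pyGetD nums j 0
  if numJ = 0 then 0
  else
    let doubleNumJ := numJ * 2
    if counter.contains doubleNumJ then
      let lst := counter.getD doubleNumJ []
      let p : Int := (bisectLeft lst j 0 lst.length : Int)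
      (PySem.List.len lst - p) * p
    else 0

theorem SF_add (l : List Int) : ∀ pre, SF FA pre l + SF F0 pre l = SF FB pre l := by
  induction l with
  | nil => intro pre; simp [SF]
  | cons v l ih =>
    intro pre
    simp only [SF, FA, F0]
    rw [← ih (pre ++ [v])]
    by_cases h : v = 0 <;> simp [h] <;> ring

theorem sum_range_split (F : List Int → Int → List Int → Int) (l : List Int) : ∀ pre,
    ((List.range l.length).map
      (fun k => F (pre ++ l.take k) (l.getD k 0) (l.drop (k + 1)))).sum = SF F pre l := by
  induction l with
  | nil => intro pre; simp [SF]
  | cons v l ih =>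
    intro pre
    rw [List.length_cons, List.range_succ_eq_map]
    simp only [List.map_cons, List.map_map, List.sum_cons, Function.comp]
    rw [SF]
    congr 1
    · simp
    · rw [← ih (pre ++ [v])]
      apply congrArg
      apply List.map_congr_left
      intro k hk
      simp [List.take_succ_cons, List.getD_cons_succ, List.append_assoc]

theorem S0_closed (l : List Int) : ∀ pre : List Int,
    6 * SF F0 pre l = 3 * (pre.count 0 : Int) * (l.count 0 : Int) * ((l.count 0 : Int) - 1)
      + (l.count 0 : Int) * ((l.count 0 : Int) - 1) * ((l.count 0 : Int) - 2) := by
  induction l with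
  | nil => intro pre; simp [SF]
  | cons v l ih =>
    intro pre
    rw [SF]
    by_cases h : v = 0
    · subst h
      have ih' := ih (pre ++ [(0:Int)])
      simp only [F0, if_pos rfl, FB, mul_zero] at *
      simp only [List.count_cons_self, List.count_append, List.count_cons, List.count_nil] at *
      push_cast at *
      norm_num at ih' ⊢
      linear_combination ih'
    · have ih' := ih (pre ++ [v])
      simp only [F0, if_neg h]
      rw [List.count_cons_of_ne (by omega), List.count_append] at *
      rw [List.count_singleton'] at ih'
      simp only [beq_iff_eq, if_neg h] at ih'  -- count [v] 0 : (if 0 = v ...)? check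
      push_cast at *
      linarith [ih']

theorem Lc_pairwise (nums : List Int) (s c : Int) : (Lc nums s c).Pairwise (· < ·) := by
  unfold Lc
  apply List.Pairwise.map
  · intro a b h; exact h
  · exact (PySem.List.pairwise_lt_enumerate nums s).filter _

theorem Lc_length (nums : List Int) : ∀ (s : Int) (c : Int), (Lc nums s c).length = nums.count c := by
  induction nums with
  | nil => intro s c; simp [Lc, PySem.List.enumerate_nil]
  | cons x l ih =>
    intro s c
    simp only [Lc, PySem.List.enumerate_cons, List.filter_cons, List.count_cons]
    by_cases h : x = c
    · simp [h, ← ih (s+1) c, Lc]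
    · simp [h, (by simpa using h : (x == c) = false), ← ih (s+1) c, Lc]

theorem Lc_lower (nums : List Int) : ∀ (s c : Int) (i : Int), i ∈ Lc nums s c → s ≤ i := by
  induction nums with
  | nil => intro s c i h; simp [Lc, PySem.List.enumerate_nil] at h
  | cons x l ih =>
    intro s c i h
    simp only [Lc, PySem.List.enumerate_cons, List.filter_cons] at h
    by_cases hx : (x == c) = true
    · rw [if_pos hx] at h
      rcases (List.mem_map.mp h) with ⟨p, hp, rfl⟩
      rcases List.mem_cons.mp hp with h1 | h2
      · subst h1; rfl
      · have := ih (s+1) c p.1 (List.mem_map.mpr ⟨p, h2, rfl⟩); omega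
    · rw [if_neg hx] at h
      have := ih (s+1) c i h; omega

theorem Lc_countP (nums : List Int) : ∀ (s c : Int) (k : Nat),
    (Lc nums s c).countP (fun i => decide (i < s + (k : Int))) = (nums.take k).count c := by
  induction nums with
  | nil => intro s c k; simp [Lc, PySem.List.enumerate_nil]
  | cons x l ih =>
    intro s c k
    simp only [Lc, PySem.List.enumerate_cons, List.filter_cons]
    match k with
    | 0 =>
      simp only [List.take_zero, List.count_nil]
      apply List.countP_eq_zero.mpr
      intro i hi
      by_cases hx : (x == c) = true
      · rw [if_pos hx] at hi
        rcases List.mem_map.mp hi with ⟨p, hp, rfl⟩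
        rcases List.mem_cons.mp hp with h1 | h2
        · subst h1; simp
        · have := Lc_lower l (s+1) c p.1 (List.mem_map.mpr ⟨p, h2, rfl⟩)
          simp; omega
      · rw [if_neg hx] at hi
        have := Lc_lower l (s+1) c _ hi
        simp; omega
    | k + 1 =>
      rw [List.take_succ_cons, List.count_cons]
      by_cases hx : (x == c) = true
      · rw [if_pos hx]
        simp only [List.map_cons, List.countP_cons]
        have h2 : (fun i => decide (i < s + ((k:Nat)+1 : Int))) = (fun i => decide (i < (s+1) + (k : Int))) := by
          funext i; simp; constructor <;> intro <;> omega
        push_cast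
        rw [h2]
        have := ih (s+1) c k
        simp only [Lc] at this
        rw [this]
        simp [hx]
      · rw [if_neg hx]
        have h2 : (fun i => decide (i < s + ((k:Nat)+1 : Int))) = (fun i => decide (i < (s+1) + (k : Int))) := by
          funext i; simp; constructor <;> intro <;> omega
        push_cast
        rw [h2]
        have := ih (s+1) c k
        simp only [Lc] at this
        rw [this]
        simp [hx]

theorem countP_cutoff {α : Type} (p : α → Bool) : ∀ (a : List α) (r : Nat), r ≤ a.length →
    (∀ i (hi : i < a.length), p a[i] = decide (i < r)) → a.countP p = r := by
  intro a
  induction a with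
  | nil => intro r hr _; simp only [List.length_nil, Nat.le_zero] at hr; simp [hr]
  | cons x l ih =>
    intro r hr h
    rw [List.countP_cons]
    match r with
    | 0 =>
      have hx : p x = false := by have := h 0 (by simp); simpa using this
      have ht : l.countP p = 0 := by
        apply ih 0 (by omega)
        intro i hi
        have := h (i+1) (by simpa using Nat.succ_lt_succ hi)
        simpa using this
      simp [hx, ht]
    | r + 1 =>
      have hx : p x = true := by have := h 0 (by simp); simpa using this
      have ht : l.countP p = r := by
        apply ih r (by simpa using hr)
        intro i hi
        have := h (i+1) (by simpa using Nat.succ_lt_succ hi)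
        simp at this ⊢
        omega
      simp [hx, ht]

theorem bisect_go (a : List Int) (x : Int) (hp : a.Pairwise (· ≤ ·)) : ∀ (m lo hi : Nat), hi - lo ≤ m →
    hi ≤ a.length → lo ≤ hi →
    (∀ i (hi2 : i < a.length), i < lo → a[i] < x) →
    (∀ i (hi2 : i < a.length), hi ≤ i → ¬ a[i] < x) →
    bisectLeft a x lo hi = a.countP (fun y => decide (y < x)) := by
  have mono : ∀ i j (hi : i < a.length) (hj : j < a.length), i ≤ j → a[i] ≤ a[j] := by
    intro i j hi hj hij
    rcases Nat.lt_or_ge i j with h | h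
    · exact (List.pairwise_iff_getElem.mp hp) i j hi hj h
    · have : i = j := by omega
      subst this; rfl
  intro m
  induction m with
  | zero =>
    intro lo hi hm hlen hlh h1 h2
    have : lo = hi := by omega
    subst this
    rw [bisectLeft, dif_neg (by omega)]
    symm
    apply countP_cutoff
    · omega
    · intro i hi2
      by_cases h : i < lo
      · simp [h1 i hi2 h, h]
      · simp [h2 i hi2 (by omega), h]
  | succ m ih =>
    intro lo hi hm hlen hlh h1 h2
    by_cases hlt : lo < hi
    · rw [bisectLeft, dif_pos hlt]
      simp only
      set mid := (lo + hi) / 2 with hmid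
      have hmr : mid < a.length := by omega
      have hget : PySem.List.pyGetD a (mid : Int) 0 = a[mid] := by
        rw [PySem.List.pyGetD_natCast]
        exact List.getD_eq_getElem a 0 hmr
      rw [hget]
      by_cases hc : a[mid] < x
      · rw [if_pos hc]
        apply ih (mid+1) hi (by omega) hlen (by omega)
        · intro i hi2 hilt
          exact lt_of_le_of_lt (mono i mid (by omega) hmr (by omega)) hc
        · exact h2
      · rw [if_neg hc]
        apply ih lo mid (by omega) (by omega) (by omega)
        · exact h1
        · intro i hi2 hge
          intro hbad
          exact hc (lt_of_le_of_lt (mono mid i hmr hi2 hge) hbad)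
    · rw [bisectLeft, dif_neg hlt]
      have : lo = hi := by omega
      subst this
      symm
      apply countP_cutoff
      · omega
      · intro i hi2
        by_cases h : i < lo
        · simp [h1 i hi2 h, h]
        · simp [h2 i hi2 (by omega), h]

theorem bisect_correct (a : List Int) (x : Int) (hp : a.Pairwise (· ≤ ·)) :
    bisectLeft a x 0 a.length = a.countP (fun y => decide (y < x)) := by
  apply bisect_go a x hp a.length 0 a.length (by omega) (by omega) (by omega)
  · intro i _ h; omega
  · intro i hi2 h; omega

theorem counter_getD (nums : List Int) (c : Int) :
    ((PySem.List.enumerate nums).foldl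
      (fun d p => d.modify p.2 [] (fun l => l ++ [p.1])) PySem.Dict.empty).getD c []
      = Lc nums 0 c := by
  have h : (PySem.List.enumerate nums).foldl
      (fun d p => d.modify p.2 [] (fun l => l ++ [p.1])) PySem.Dict.empty
      = ((PySem.List.enumerate nums).map Prod.swap).foldl
        (fun d p => d.modify p.1 [] (fun l => l ++ [p.2])) PySem.Dict.empty := by
    rw [List.foldl_map]
    simp [Prod.swap]
  rw [h, PySem.Dict.getD_foldl_modify_append]
  simp [Lc, List.filter_map, Function.comp_def, List.map_map, Prod.swap]

-- contains of A's counter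

theorem counter_contains_aux (f : List Int → Int → List Int) :
    ∀ (l : List (Int × Int)) (d : PySem.Dict Int (List Int)) (c : Int),
    (l.foldl (fun d p => d.modify p.2 [] (fun l => f l p.1)) d).contains c
      = (d.contains c || l.any (fun p => c == p.2)) := by
  intro l
  induction l with
  | nil => simp
  | cons p l ih =>
    intro d c
    simp only [List.foldl_cons, List.any_cons]
    rw [ih]
    unfold PySem.Dict.modify
    rw [PySem.Dict.contains_insert]
    cases h : (c == p.2) <;> simp [h]

theorem counter_contains (nums : List Int) (c : Int) :
    ((PySem.List.enumerate nums).foldl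
      (fun d p => d.modify p.2 [] (fun l => l ++ [p.1])) PySem.Dict.empty).contains c
      = nums.any (fun y => c == y) := by
  rw [counter_contains_aux (fun l i => l ++ [i])]
  have h2 : ((PySem.List.enumerate nums).map (fun p => p.2)).any (fun y => c == y)
      = (PySem.List.enumerate nums).any (fun p => c == p.2) := by
    rw [List.any_map]; rfl
  rw [← h2, PySem.List.map_snd_enumerate]
  simp

theorem contains_false_count (nums : List Int) (c : Int)
    (h : ¬ nums.any (fun y => c == y) = true) : nums.count c = 0 := by
  rw [List.count_eq_zero]
  intro hmem
  exact h (List.any_eq_true.mpr ⟨c, hmem, by simp⟩)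

-- B's frequency dict

theorem freq_getD : ∀ (l : List Int) (d : PySem.Dict Int Int) (t : Int),
    (l.foldl (fun d v => d.insert v (d.getD v 0 + 1)) d).getD t 0 = d.getD t 0 + l.count t := by
  intro l
  induction l with
  | nil => simp
  | cons v l ih =>
    intro d t
    simp only [List.foldl_cons]
    rw [ih, PySem.Dict.getD_insert, List.count_cons]
    by_cases h : t = v
    · subst h; simp; push_cast; ring
    · have hb : (v == t) = false := by simpa using (Ne.symm h)
      rw [if_neg h, hb]
      push_cast; ring

theorem B_loop : ∀ (suf pre : List Int) (res : Int) (left right : PySem.Dict Int Int),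
    (∀ t, left.getD t 0 = (pre.count t : Int)) →
    (∀ t, right.getD t 0 = (suf.count t : Int)) →
    (suf.foldl (fun (s : Int × PySem.Dict Int Int × PySem.Dict Int Int) v =>
      let right := s.2.2.insert v (s.2.2.getD v 0 - 1)
      let t := 2 * v
      let res := s.1 + s.2.1.getD t 0 * right.getD t 0
      let left := s.2.1.insert v (s.2.1.getD v 0 + 1)
      (res, left, right)) (res, left, right)).1 = res + SF FB pre suf := by
  intro suf
  induction suf with
  | nil => intro pre res left right _ _; simp [SF]
  | cons v suf ih =>
    intro pre res left right hl hr
    simp only [List.foldl_cons]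
    have hr' : ∀ t, (right.insert v (right.getD v 0 - 1)).getD t 0 = (suf.count t : Int) := by
      intro t
      rw [PySem.Dict.getD_insert]
      by_cases h : t = v
      · rw [if_pos h, hr v, h, List.count_cons_self]
        push_cast; ring
      · rw [if_neg h, hr t, List.count_cons_of_ne (by omega)]
    have hl' : ∀ t, (left.insert v (left.getD v 0 + 1)).getD t 0 = ((pre ++ [v]).count t : Int) := by
      intro t
      rw [PySem.Dict.getD_insert, List.count_append]
      by_cases h : t = v
      · rw [if_pos h, hl v, h]
        simp
      · rw [if_neg h, hl t]
        have hz : List.count t [v] = 0 := by simp [List.count_singleton', Ne.symm h]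
        simp [hz]
    rw [ih (pre ++ [v]) _ _ _ hl' hr']
    rw [SF, FB, hl (2*v), hr' (2*v)]
    ring

theorem B_eval (nums : List Int) :
    specialTriplets_alt nums = PySem.Int.mod (SF FB [] nums) ((10 : Int) ^ 9 + 7) := by
  show PySem.Int.mod
      ((nums.foldl (fun (s : Int × PySem.Dict Int Int × PySem.Dict Int Int) v =>
        let right := s.2.2.insert v (s.2.2.getD v 0 - 1)
        let t := 2 * v
        let res := s.1 + s.2.1.getD t 0 * right.getD t 0
        let left := s.2.1.insert v (s.2.1.getD v 0 + 1)
        (res, left, right))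
        (0, PySem.Dict.empty,
          nums.foldl (fun d v => d.insert v (d.getD v 0 + 1)) PySem.Dict.empty)).1)
      (10 ^ 9 + 7) = _
  rw [B_loop nums [] 0 PySem.Dict.empty _ (by intro t; simp) (by intro t; rw [freq_getD]; simp)]
  norm_num

theorem gA_eq (nums : List Int) (k : Nat) (hk : k < nums.length) :
    gA nums ((PySem.List.enumerate nums).foldl
      (fun d p => d.modify p.2 [] (fun l => l ++ [p.1])) PySem.Dict.empty) ((k : Int))
    = FA (nums.take k) (nums.getD k 0) (nums.drop (k + 1)) := by
  have hv : PySem.List.pyGetD nums ((k : Int)) 0 = nums[k] := by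
    rw [PySem.List.pyGetD_natCast]; exact List.getD_eq_getElem nums 0 hk
  have hv2 : nums.getD k 0 = nums[k] := List.getD_eq_getElem nums 0 hk
  unfold gA FA
  dsimp only
  rw [hv, hv2]
  by_cases hv0 : nums[k] = 0
  · simp [hv0]
  · rw [if_neg hv0, if_neg hv0]
    set c := nums[k] * 2 with hc
    have hsplit : List.count c nums
        = List.count c (nums.take k) + List.count c (nums.drop (k + 1)) := by
      conv_lhs => rw [← List.take_append_drop k nums, ← List.getElem_cons_drop hk]
      rw [List.count_append, List.count_cons_of_ne (by omega)]
    rw [counter_contains]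
    by_cases hcon : nums.any (fun y => c == y) = true
    · rw [if_pos hcon]
      rw [counter_getD]
      have hpair : (Lc nums 0 c).Pairwise (· ≤ ·) :=
        (Lc_pairwise nums 0 c).imp (fun h => le_of_lt h)
      rw [bisect_correct _ _ hpair]
      have hcp : (Lc nums 0 c).countP (fun y => decide (y < (k : Int)))
          = (nums.take k).count c := by
        have h := Lc_countP nums 0 c k
        have he : (fun i : Int => decide (i < 0 + (k : Int)))
            = fun y => decide (y < (k : Int)) := by
          funext i; norm_num
        rw [he] at h
        exact h
      rw [hcp, PySem.List.len_eq, Lc_length, hsplit, FB]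
      rw [show (2 : Int) * nums[k] = c from by rw [hc]; ring]
      push_cast
      ring
    · rw [if_neg hcon]
      have h0 : nums.count c = 0 :=
        contains_false_count nums _ hcon
      have h1 : (nums.take k).count c = 0 := by
        have := List.Sublist.count_le c (List.take_sublist k nums); omega
      rw [FB, show (2 : Int) * nums[k] = c from by rw [hc]; ring, h1]
      simp

theorem A_eval (nums : List Int) :
    specialTriplets nums
      = PySem.Int.mod (SF F0 [] nums + SF FA [] nums) ((10 : Int) ^ 9 + 7) := by
  show PySem.Int.mod
      ((PySem.List.pyRange 0 (PySem.List.len nums)).foldl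
        (fun result j =>
          let numJ := PySem.List.pyGetD nums j 0
          if numJ = 0 then result
          else
            let doubleNumJ := numJ * 2
            if ((PySem.List.enumerate nums).foldl
                (fun d p => d.modify p.2 [] (fun l => l ++ [p.1]))
                PySem.Dict.empty).contains doubleNumJ then
              let lst := ((PySem.List.enumerate nums).foldl
                (fun d p => d.modify p.2 [] (fun l => l ++ [p.1]))
                PySem.Dict.empty).getD doubleNumJ []
              let p : Int := (bisectLeft lst j 0 lst.length : Int)
              result + (PySem.List.len lst - p) * p
            else result)
        (if ((PySem.List.enumerate nums).foldl
              (fun d p => d.modify p.2 [] (fun l => l ++ [p.1]))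
              PySem.Dict.empty).contains 0 then
          0 + PySem.Int.floordiv
            (PySem.List.len (((PySem.List.enumerate nums).foldl
                (fun d p => d.modify p.2 [] (fun l => l ++ [p.1]))
                PySem.Dict.empty).getD 0 [])
              * (PySem.List.len (((PySem.List.enumerate nums).foldl
                  (fun d p => d.modify p.2 [] (fun l => l ++ [p.1]))
                  PySem.Dict.empty).getD 0 []) - 1)
              * (PySem.List.len (((PySem.List.enumerate nums).foldl
                  (fun d p => d.modify p.2 [] (fun l => l ++ [p.1]))
                  PySem.Dict.empty).getD 0 []) - 2)) 6
        else 0))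
      (10 ^ 9 + 7) = _
  set counter := (PySem.List.enumerate nums).foldl
      (fun d p => d.modify p.2 [] (fun l => l ++ [p.1])) PySem.Dict.empty with hcounter
  have hz : (if counter.contains 0 then
      0 + PySem.Int.floordiv (PySem.List.len (counter.getD 0 [])
        * (PySem.List.len (counter.getD 0 []) - 1)
        * (PySem.List.len (counter.getD 0 []) - 2)) 6 else 0) = SF F0 [] nums := by
    by_cases hcon : counter.contains 0 = true
    · rw [if_pos hcon, hcounter, counter_getD, PySem.List.len_eq, Lc_length]
      have hS := S0_closed nums []
      simp only [List.count_nil, Nat.cast_zero, mul_zero, zero_mul, zero_add] at hS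
      rw [show ((nums.count 0 : Int)) * ((nums.count 0 : Int) - 1) * ((nums.count 0 : Int) - 2)
            = 6 * SF F0 [] nums from by linarith]
      unfold PySem.Int.floordiv
      rw [Int.mul_fdiv_cancel_left _ (by norm_num)]
      ring
    · rw [if_neg hcon]
      rw [hcounter, counter_contains] at hcon
      have h0 : nums.count 0 = 0 := contains_false_count nums 0 hcon
      have hS := S0_closed nums []
      rw [h0] at hS
      simp at hS
      omega
  have hloop : ∀ r0 : Int, (PySem.List.pyRange 0 (PySem.List.len nums)).foldl
      (fun result j =>
        let numJ := PySem.List.pyGetD nums j 0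
        if numJ = 0 then result
        else
          let doubleNumJ := numJ * 2
          if counter.contains doubleNumJ then
            let lst := counter.getD doubleNumJ []
            let p : Int := (bisectLeft lst j 0 lst.length : Int)
            result + (PySem.List.len lst - p) * p
          else result) r0 = r0 + SF FA [] nums := by
    intro r0
    rw [PySem.List.foldl_congr_mem _ _ (fun acc j => acc + gA nums counter j) r0 ?_]
    · rw [PySem.List.foldl_add]
      congr 1
      rw [PySem.List.pyRange_one, List.map_map]
      have hn : ((PySem.List.len nums : Int) - 0).toNat = nums.length := by
        rw [PySem.List.len_eq]; omega
      rw [hn]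
      rw [← sum_range_split FA nums []]
      congr 1
      apply List.map_congr_left
      intro k hkr
      have hk : k < nums.length := List.mem_range.mp hkr
      simp only [Function.comp_apply, zero_add, List.nil_append]
      rw [hcounter, gA_eq nums k hk]
    · intro acc j _
      unfold gA
      dsimp only
      split_ifs <;> ring
  rw [hz, hloop]

-- ===== VERDICT (by name: the statement is the Claim_ definition above) =====
theorem specialTriplets_spec : Claim_equal_specialTriplets := by
  intro nums _
  unfold Spec_specialTriplets
  rw [A_eval, B_eval, ← SF_add nums []]
  ring_nf
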